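-- pv_equiv track=rewrite | github.com/benyetra/YetAI | backend/app/services/trade_analyzer_service.py | _generate_risk_mitigation
-- ===== SOURCE A (Python) =====
-- from typing import List, Optional, Dict, Any, Tuple
--
-- def _generate_risk_mitigation(risks: List[str]) -> List[str]:
--     """Generate suggestions for mitigating identified risks"""
--     suggestions = []
--
--     for risk in risks:
--         if "injury-prone" in risk.lower():
--             suggestions.append("Consider handcuff players or backup options")
--         elif "aging" in risk.lower():
--             suggestions.append("Monitor snap counts and usage trends closely")
--         elif "draft capital" in risk.lower():
--             suggestions.append("Ensure immediate upgrade justifies future cost")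
--
--     return suggestions
-- ===== SOURCE B (Python) =====
-- KEYWORDS = ("injury-prone", "aging", "draft capital")
-- MESSAGES = (
--     "Consider handcuff players or backup options",
--     "Monitor snap counts and usage trends closely",
--     "Ensure immediate upgrade justifies future cost",
-- )
--
-- def _generate_risk_mitigation(risks):
--     # Stage 1: for every risk, collect ALL matching keyword indices (no short-circuit).
--     hit_sets = [[i for i, kw in enumerate(KEYWORDS) if kw in r.lower()] for r in risks]
--     # Stage 2: resolve priority arithmetically (min index) and drop unmatched risks.
--     return [MESSAGES[min(hits)] for hits in hit_sets if hits]
-- ===== Notes on version B (the rewrite author's own statement) =====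
-- stated objective: alternative
-- what changed: Two staged comprehensions: first collect the full set of matching keyword indices per risk, then resolve priority arithmetically by min index over that set, instead of a short-circuiting if/elif chain inside one loop.
import Mathlib
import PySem

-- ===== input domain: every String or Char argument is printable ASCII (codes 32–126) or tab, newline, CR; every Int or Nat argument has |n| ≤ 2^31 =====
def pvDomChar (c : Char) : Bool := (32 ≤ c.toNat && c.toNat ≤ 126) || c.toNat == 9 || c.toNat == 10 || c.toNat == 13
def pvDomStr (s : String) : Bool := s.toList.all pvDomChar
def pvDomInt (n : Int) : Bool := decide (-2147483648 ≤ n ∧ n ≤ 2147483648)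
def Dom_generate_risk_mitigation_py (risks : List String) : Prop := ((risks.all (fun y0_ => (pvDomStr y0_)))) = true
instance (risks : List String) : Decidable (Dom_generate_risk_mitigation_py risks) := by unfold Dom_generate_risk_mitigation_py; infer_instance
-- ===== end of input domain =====

-- ===== PORT A =====
def generate_risk_mitigation_py (risks : List String) : List String :=
  risks.foldl (fun suggestions risk =>
    if PySem.Str.isIn "injury-prone" (PySem.Str.lower risk) then
      suggestions ++ ["Consider handcuff players or backup options"]
    else if PySem.Str.isIn "aging" (PySem.Str.lower risk) then
      suggestions ++ ["Monitor snap counts and usage trends closely"]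
    else if PySem.Str.isIn "draft capital" (PySem.Str.lower risk) then
      suggestions ++ ["Ensure immediate upgrade justifies future cost"]
    else suggestions) []

-- ===== PORT B =====
-- B changes the decomposition: stage 1 collects all matching keyword indices per
-- risk; stage 2 resolves priority by min index (no if/elif short-circuit).
def pvKeywords : List String := ["injury-prone", "aging", "draft capital"]
def pvMessages : List String :=
  ["Consider handcuff players or backup options",
   "Monitor snap counts and usage trends closely",
   "Ensure immediate upgrade justifies future cost"]

-- stage-1 comprehension body: [i for i, kw in enumerate(KEYWORDS) if kw in r.lower()]
def pvHitIndices (r : String) : List Int :=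
  ((PySem.List.enumerate pvKeywords).filter
      (fun p => PySem.Str.isIn p.2 (PySem.Str.lower r))).map (fun p => p.1)

-- stage-2 comprehension body: MESSAGES[min(hits)]  (min(hits) is always 0, 1 or 2,
-- so the index is in range and the getD default is never used)
def pvResolve (hits : List Int) : String :=
  match PySem.List.min? hits (fun i => i) with
  | some i => (PySem.List.pyGet? pvMessages i).getD ""
  | none => ""

def generate_risk_mitigation_py_alt (risks : List String) : List String :=
  let hit_sets := risks.map pvHitIndices
  (hit_sets.filter (fun hits => !hits.isEmpty)).map pvResolve

-- ===== PRECONDITION & SPEC =====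
def Spec_generate_risk_mitigation_py (risks : List String) (out : List String) : Prop := out = generate_risk_mitigation_py_alt risks
instance (risks : List String) (out : List String) : Decidable (Spec_generate_risk_mitigation_py risks out) := by unfold Spec_generate_risk_mitigation_py; infer_instance

-- ===== CLAIM (what is proved, stated in full; the proofs are below) =====
def Claim_equal_generate_risk_mitigation_py : Prop := ∀ (risks : List String), Dom_generate_risk_mitigation_py risks → Spec_generate_risk_mitigation_py risks (generate_risk_mitigation_py risks)

-- ===== LEMMAS AND PROOFS =====

-- the per-risk contribution both programs make, as one function
def pvF (r : String) : List String :=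
  if PySem.Str.isIn "injury-prone" (PySem.Str.lower r) then
    ["Consider handcuff players or backup options"]
  else if PySem.Str.isIn "aging" (PySem.Str.lower r) then
    ["Monitor snap counts and usage trends closely"]
  else if PySem.Str.isIn "draft capital" (PySem.Str.lower r) then
    ["Ensure immediate upgrade justifies future cost"]
  else []

theorem pvA_eq (risks : List String) :
    generate_risk_mitigation_py risks = risks.flatMap pvF := by
  unfold generate_risk_mitigation_py
  have h : (fun (suggestions : List String) (risk : String) =>
      if PySem.Str.isIn "injury-prone" (PySem.Str.lower risk) then
        suggestions ++ ["Consider handcuff players or backup options"]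
      else if PySem.Str.isIn "aging" (PySem.Str.lower risk) then
        suggestions ++ ["Monitor snap counts and usage trends closely"]
      else if PySem.Str.isIn "draft capital" (PySem.Str.lower risk) then
        suggestions ++ ["Ensure immediate upgrade justifies future cost"]
      else suggestions)
      = fun suggestions risk => suggestions ++ pvF risk := by
    funext s r; unfold pvF; split_ifs <;> simp
  rw [h, PySem.List.foldl_append_eq_flatMap]
  simp

-- per-risk equality of B's two stages with pvF
theorem pvB_step (r : String) :
    (if (pvHitIndices r).isEmpty then [] else [pvResolve (pvHitIndices r)]) = pvF r := by
  by_cases h1 : PySem.Str.isIn "injury-prone" (PySem.Str.lower r) <;>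
  by_cases h2 : PySem.Str.isIn "aging" (PySem.Str.lower r) <;>
  by_cases h3 : PySem.Str.isIn "draft capital" (PySem.Str.lower r) <;>
    simp_all [pvHitIndices, pvResolve, pvF, pvKeywords, pvMessages,
      PySem.List.enumerate, PySem.List.min?, PySem.List.pyGet?, PySem.List.pyIdx?]

theorem pvB_eq (risks : List String) :
    generate_risk_mitigation_py_alt risks = risks.flatMap pvF := by
  induction risks with
  | nil => rfl
  | cons r rest ih =>
      show ((((r :: rest).map pvHitIndices).filter (fun hits => !hits.isEmpty)).map pvResolve)
          = (r :: rest).flatMap pvF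
      rw [List.map_cons, List.filter_cons, List.flatMap_cons, ← pvB_step r]
      by_cases h : (pvHitIndices r).isEmpty <;> simp [h] <;> exact ih

-- ===== VERDICT (by name: the statement is the Claim_ definition above) =====
theorem generate_risk_mitigation_py_spec : Claim_equal_generate_risk_mitigation_py := by
  intro risks _
  show generate_risk_mitigation_py risks = generate_risk_mitigation_py_alt risks
  rw [pvA_eq, pvB_eq]
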